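-- pv_equiv track=rewrite | github.com/WojciechBednarczyk/Scrambling | server.py | scramV34
-- ===== SOURCE A (Python) =====
-- from operator import xor
--
-- def async_clock(frame, data, bit):
--     if bit[1] != -1:                                   # Sprawdzanie czy używamy obu bitów, potrzebne dla niektórych scramblerów
--       temp = xor(frame[bit[0]-1], frame[bit[1]-1])     # XOR dla bit[0] i bit[1],
--     else:                                              # Jeśli tylko 1 bit, przypisujemy wartość temu bitowi
--         temp = frame[bit[0]-1]
--     frame.pop()                                         # Usuwanie ostatniego bitu z ramki
--     xor_value = xor(temp, data)                         # Sprzężenie zwrotne wartości syganłu wejściowego i xora z bitów ramki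
--     frame.insert(0, xor_value)                           # Dodawanie na początek ramki xora
--     return xor_value                                     # Rezultat zakodowanego sygnału
--
-- def scramV34(bits):
--     dataLength = len(bits)
--     frameV34 = [1, 0, 0, 1, 0, 0, 0, 1, 0, 0, 1, 0, 0, 0, 0, 1, 0, 1, 0, 1, 1, 0, 1] # Ramka
--     scramBits = [18, 23]                                                        # Bity używane w sprzężeniu zwrotym, dla V34 bit 18 i 23
--     output_signal = []                                                          # Tablica na dane wyjściowe
--     for i in range(0, dataLength):                                              # Iteracja po całej tablicy danych wejściowych
--         clock_result = async_clock(frameV34, bits[i], scramBits)   # Wykonanie operacji zegara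
--         output_signal.append(clock_result)                                      # Dodanie wyników do tablicy danych wyjściowych
--     return output_signal
-- ===== SOURCE B (Python) =====
-- def scramV34(bits):
--     # History list: reversed initial register followed by every output bit.
--     # The inserted register value IS the output bit, so the register is just
--     # the last 23 history entries: out = b ^ hist[-18] ^ hist[-23].
--     hist = [1, 0, 0, 1, 0, 0, 0, 1, 0, 0, 1, 0, 0, 0, 0, 1, 0, 1, 0, 1, 1, 0, 1][::-1]
--     for b in bits:
--         hist.append(b ^ hist[-18] ^ hist[-23])
--     return hist[23:]
-- ===== Notes on version B (the rewrite author's own statement) =====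
-- stated objective: simpler
-- what changed: Replaces the mutated 23-bit shift register (pop last + insert at front each step, helper async_clock) with a single append-only history list whose last 23 entries are the register: each output is the input bit xored with the history entries 18 and 23 positions back, and the result is the history minus its 23-entry seed.
import Mathlib
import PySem

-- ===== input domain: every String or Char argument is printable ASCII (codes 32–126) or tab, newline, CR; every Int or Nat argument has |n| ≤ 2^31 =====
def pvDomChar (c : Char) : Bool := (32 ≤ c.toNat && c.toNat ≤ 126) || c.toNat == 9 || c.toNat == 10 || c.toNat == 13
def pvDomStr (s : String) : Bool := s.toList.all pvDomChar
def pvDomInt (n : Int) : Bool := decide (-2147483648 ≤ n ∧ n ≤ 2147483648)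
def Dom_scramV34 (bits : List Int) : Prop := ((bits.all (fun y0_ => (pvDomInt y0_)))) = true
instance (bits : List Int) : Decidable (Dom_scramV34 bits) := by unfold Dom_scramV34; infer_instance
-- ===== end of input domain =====

-- B replaces the 23-bit shift register (pop/insert per step) by a single history list whose
-- last 23 entries ARE the register: out = b ^ hist[-18] ^ hist[-23]; objective: simpler.


-- ===== PORT A =====
-- async_clock: frame[bit[0]-1] / frame[bit[1]-1] ported with pyGetD 0 and frame.pop() with
-- dropLast — exact here because the register always has 23 elements (indices 17/22 in range,
-- list nonempty); frame.insert(0, v) via PySem.List.insert. Returns (new frame, xor_value).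
def asyncClock (frame : List Int) (data : Int) (bit : Int × Int) : List Int × Int :=
  let temp := if bit.2 ≠ -1 then
      PySem.Int.bxor (PySem.List.pyGetD frame (bit.1 - 1) 0) (PySem.List.pyGetD frame (bit.2 - 1) 0)
    else PySem.List.pyGetD frame (bit.1 - 1) 0
  let frame1 := frame.dropLast                     -- frame.pop()
  let xorValue := PySem.Int.bxor temp data
  (PySem.List.insert frame1 0 xorValue, xorValue)  -- frame.insert(0, xor_value)

def scramV34 (bits : List Int) : List Int :=
  let frameV34 : List Int := [1, 0, 0, 1, 0, 0, 0, 1, 0, 0, 1, 0, 0, 0, 0, 1, 0, 1, 0, 1, 1, 0, 1]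
  let scramBits : Int × Int := (18, 23)
  (bits.foldl (fun (st : List Int × List Int) b =>
      let r := asyncClock st.1 b scramBits
      (r.1, st.2 ++ [r.2])) (frameV34, ([] : List Int))).2

-- ===== PORT B =====
-- hist[-18] / hist[-23] ported with pyGetD 0 — exact because hist always has ≥ 23 elements.
def scramV34_alt (bits : List Int) : List Int :=
  let hist := bits.foldl (fun hist b =>
      hist ++ [PySem.Int.bxor (PySem.Int.bxor b (PySem.List.pyGetD hist (-18) 0))
                 (PySem.List.pyGetD hist (-23) 0)])
    (([1, 0, 0, 1, 0, 0, 0, 1, 0, 0, 1, 0, 0, 0, 0, 1, 0, 1, 0, 1, 1, 0, 1] : List Int).reverse)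
  PySem.List.slice hist (some 23) none             -- hist[23:]

-- ===== PRECONDITION & SPEC =====
def Spec_scramV34 (bits : List Int) (out : List Int) : Prop := out = scramV34_alt bits
instance (bits : List Int) (out : List Int) : Decidable (Spec_scramV34 bits out) := by unfold Spec_scramV34; infer_instance

-- ===== CLAIM (what is proved, stated in full; the proofs are below) =====
def Claim_equal_scramV34 : Prop := ∀ (bits : List Int), Dom_scramV34 bits → Spec_scramV34 bits (scramV34 bits)

-- ===== LEMMAS AND PROOFS =====

theorem pvBxor_eq_xor (a b : Int) : PySem.Int.bxor a b = Int.xor a b := by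
  unfold PySem.Int.bxor
  cases a with
  | ofNat m => cases b with
    | ofNat n => simp [Int.xor]
    | negSucc n => simp [Int.xor, Int.negSucc_eq]; omega
  | negSucc m => cases b with
    | ofNat n => simp [Int.xor, Int.negSucc_eq]; omega
    | negSucc n => simp [Int.xor, Int.negSucc_eq]; omega

theorem pvXor_assoc (a b c : Int) : (a.xor b).xor c = a.xor (b.xor c) := by
  cases a <;> cases b <;> cases c <;> simp [Int.xor, Nat.xor_assoc]

theorem pvXor_comm (a b : Int) : a.xor b = b.xor a := by
  cases a <;> cases b <;> simp [Int.xor, Nat.xor_comm]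

-- the step value of B, and the pure output stream computed from a history list
def pvNext (hist : List Int) (b : Int) : Int :=
  PySem.Int.bxor (PySem.Int.bxor b (PySem.List.pyGetD hist (-18) 0)) (PySem.List.pyGetD hist (-23) 0)

def pvOuts (hist : List Int) : List Int → List Int
  | [] => []
  | b :: rest => pvNext hist b :: pvOuts (hist ++ [pvNext hist b]) rest

theorem pvB_fold (bits : List Int) : ∀ (hist : List Int),
    bits.foldl (fun hist b =>
      hist ++ [PySem.Int.bxor (PySem.Int.bxor b (PySem.List.pyGetD hist (-18) 0))
                 (PySem.List.pyGetD hist (-23) 0)]) hist = hist ++ pvOuts hist bits := by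
  induction bits with
  | nil => intro hist; simp [pvOuts]
  | cons b rest ih => intro hist; simp [pvOuts, ih, pvNext]

theorem pvTap (hist : List Int) (k : Nat) (hk : 0 < k) (hk23 : k ≤ 23) (h : 23 ≤ hist.length) :
    PySem.List.pyGetD (hist.reverse.take 23) ((k : Int) - 1) 0 = PySem.List.pyGetD hist (-(k : Int)) 0 := by
  rw [PySem.List.pyGetD_neg_natCast hist k 0 hk (by omega)]
  have h1 : ((k : Int) - 1) = ((k - 1 : Nat) : Int) := by omega
  rw [h1, PySem.List.pyGetD_natCast]
  have hlt : k - 1 < (hist.reverse.take 23).length := by simp; omega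
  rw [List.getD_eq_getElem _ _ hlt]
  simp only [List.getElem_take, List.getElem_reverse]
  congr 1
  omega

theorem pvStep (hist : List Int) (b : Int) (h : 23 ≤ hist.length) :
    asyncClock (hist.reverse.take 23) b (18, 23)
      = ((hist ++ [pvNext hist b]).reverse.take 23, pvNext hist b) := by
  have h18 := pvTap hist 18 (by omega) (by omega) h
  have h23 := pvTap hist 23 (by omega) (by omega) h
  have e18 : ((18 : Int) - 1) = ((18 : Nat) : Int) - 1 := by norm_num
  have e23 : ((23 : Int) - 1) = ((23 : Nat) : Int) - 1 := by norm_num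
  have en18 : (-18 : Int) = -((18 : Nat) : Int) := by norm_num
  have en23 : (-23 : Int) = -((23 : Nat) : Int) := by norm_num
  unfold asyncClock pvNext
  simp only [ne_eq, e18, e23, h18, h23, en18, en23]
  rw [if_pos (show ¬(23:Int) = -1 by norm_num)]
  have hx : ∀ x y : Int, PySem.Int.bxor (PySem.Int.bxor x y) b
      = PySem.Int.bxor (PySem.Int.bxor b x) y := by
    intro x y
    simp only [pvBxor_eq_xor]
    rw [pvXor_assoc, pvXor_comm y b, ← pvXor_assoc, pvXor_comm x b]
  have hdl : (hist.reverse.take 23).dropLast = hist.reverse.take 22 := by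
    rw [List.dropLast_eq_take, List.take_take]
    congr 1
    simp
    omega
  simp only [Prod.mk.injEq]
  refine ⟨?_, hx _ _⟩
  rw [PySem.List.insert_zero, hdl, List.reverse_append]
  simp only [List.reverse_singleton, List.singleton_append, List.take_succ_cons]
  rw [hx]

theorem pvA_fold (bits : List Int) : ∀ (hist acc : List Int), 23 ≤ hist.length →
    (bits.foldl (fun (st : List Int × List Int) b =>
        let r := asyncClock st.1 b (18, 23)
        (r.1, st.2 ++ [r.2])) (hist.reverse.take 23, acc)).2 = acc ++ pvOuts hist bits := by
  induction bits with
  | nil => intro hist acc _; simp [pvOuts]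
  | cons b rest ih =>
    intro hist acc h
    simp only [List.foldl_cons, pvStep hist b h]
    rw [ih (hist ++ [pvNext hist b]) (acc ++ [pvNext hist b]) (by simp; omega)]
    simp [pvOuts]

-- ===== VERDICT (by name: the statement is the Claim_ definition above) =====
theorem scramV34_spec : Claim_equal_scramV34 := by
  intro bits _
  unfold Spec_scramV34 scramV34 scramV34_alt
  dsimp only
  set seed : List Int := [1, 0, 0, 1, 0, 0, 0, 1, 0, 0, 1, 0, 0, 0, 0, 1, 0, 1, 0, 1, 1, 0, 1] with hseed
  have hs : seed = seed.reverse.reverse.take 23 := by rw [hseed]; decide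
  rw [pvB_fold bits seed.reverse, PySem.List.slice_from _ (by norm_num)]
  have hlen : seed.reverse.length = 23 := by rw [hseed]; decide
  conv_lhs => rw [hs]
  rw [pvA_fold bits seed.reverse [] (by omega)]
  simp [hlen]
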